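-- pv_equiv track=rewrite | github.com/philipp-mohr/pyopencl-extension | pyopencl_extension/emulation.py | compute_linear_idx
-- ===== SOURCE A (Python) =====
-- def compute_linear_idx(idx_tuple, dimensions)->int:
--     idx = 0
--     n_dim = len(dimensions)
--     for i in range(n_dim):
--         offset = 1
--         for j in range(i + 1, n_dim):
--             offset *= int(dimensions[j])  # self.get_global_size(j) / self.get_local_size(j)
--         idx += idx_tuple[i] * offset
--     return idx
-- ===== SOURCE B (Python) =====
-- def compute_linear_idx(idx_tuple, dimensions) -> int:
--     # single backward pass: accumulate the running suffix product (stride)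
--     idx = 0
--     stride = 1
--     for i, d in reversed(list(zip(idx_tuple, dimensions))):
--         idx += i * stride
--         stride *= int(d)
--     return idx
-- ===== Notes on version B (the rewrite author's own statement) =====
-- stated objective: faster
-- what changed: Replaced the nested loop that recomputes each suffix product from scratch with a single backward pass over zip(idx_tuple, dimensions) that maintains a running stride.
import Mathlib
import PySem

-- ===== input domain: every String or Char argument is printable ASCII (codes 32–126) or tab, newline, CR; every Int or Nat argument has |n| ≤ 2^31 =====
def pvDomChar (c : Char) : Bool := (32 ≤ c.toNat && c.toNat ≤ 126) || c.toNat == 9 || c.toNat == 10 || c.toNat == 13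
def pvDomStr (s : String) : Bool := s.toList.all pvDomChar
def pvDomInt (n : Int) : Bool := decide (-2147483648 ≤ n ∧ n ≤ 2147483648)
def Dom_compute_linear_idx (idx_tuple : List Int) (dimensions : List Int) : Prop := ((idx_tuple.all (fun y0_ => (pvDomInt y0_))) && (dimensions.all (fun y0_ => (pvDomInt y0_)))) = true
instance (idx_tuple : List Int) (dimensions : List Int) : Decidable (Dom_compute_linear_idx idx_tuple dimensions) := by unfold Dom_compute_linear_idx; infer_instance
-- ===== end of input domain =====

-- B replaces A's O(n^2) nested suffix-product recomputation by one O(n) backward pass with a running stride.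

-- ===== PORT A =====
def compute_linear_idx (idx_tuple : List Int) (dimensions : List Int) : Int :=
  (PySem.List.pyRange 0 (PySem.List.len dimensions) 1).foldl
    (fun idx i =>
      let offset := (PySem.List.pyRange (i + 1) (PySem.List.len dimensions) 1).foldl
        (fun o j => o * PySem.List.pyGetD dimensions j 0) 1
      idx + PySem.List.pyGetD idx_tuple i 0 * offset) 0

-- ===== PORT B =====
def compute_linear_idx_alt (idx_tuple : List Int) (dimensions : List Int) : Int :=
  ((idx_tuple.zip dimensions).reverse.foldl
    (fun (p : Int × Int) (e : Int × Int) => (p.1 + e.1 * p.2, p.2 * e.2)) (0, 1)).1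

-- ===== PRECONDITION & SPEC =====
-- A raises IndexError on idx_tuple[i] exactly when idx_tuple is shorter than dimensions.
def Pre_compute_linear_idx (idx_tuple : List Int) (dimensions : List Int) : Prop :=
  dimensions.length ≤ idx_tuple.length
instance (idx_tuple : List Int) (dimensions : List Int) : Decidable (Pre_compute_linear_idx idx_tuple dimensions) := by unfold Pre_compute_linear_idx; infer_instance

def pvWitness_compute_linear_idx : List Int × List Int := ([2, 1, 3], [4, 5, 6])

def Spec_compute_linear_idx (idx_tuple : List Int) (dimensions : List Int) (out : Int) : Prop := out = compute_linear_idx_alt idx_tuple dimensions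
instance (idx_tuple : List Int) (dimensions : List Int) (out : Int) : Decidable (Spec_compute_linear_idx idx_tuple dimensions out) := by unfold Spec_compute_linear_idx; infer_instance

-- ===== CLAIM (what is proved, stated in full; the proofs are below) =====
def Claim_equal_compute_linear_idx : Prop := ∀ (idx_tuple : List Int) (dimensions : List Int), Dom_compute_linear_idx idx_tuple dimensions → Pre_compute_linear_idx idx_tuple dimensions → Spec_compute_linear_idx idx_tuple dimensions (compute_linear_idx idx_tuple dimensions)

-- ===== LEMMAS AND PROOFS =====

-- B's backward loop as structural recursion on the zipped list (foldr view of the reversed foldl).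
def pvLin : List (Int × Int) → Int × Int
  | [] => (0, 1)
  | e :: rest =>
    let r := pvLin rest
    (r.1 + e.1 * r.2, r.2 * e.2)

theorem pvLin_eq_foldr (l : List (Int × Int)) :
    pvLin l = l.foldr (fun e p => (p.1 + e.1 * p.2, p.2 * e.2)) (0, 1) := by
  induction l with
  | nil => rfl
  | cons e rest ih => simp [pvLin, ih]

theorem alt_eq_pvLin (idx_tuple dimensions : List Int) :
    compute_linear_idx_alt idx_tuple dimensions = (pvLin (idx_tuple.zip dimensions)).1 := by
  simp [compute_linear_idx_alt, List.foldl_reverse, pvLin_eq_foldr]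

theorem pvLin_snd (is ds : List Int) (h : ds.length ≤ is.length) :
    (pvLin (is.zip ds)).2 = ds.prod := by
  induction ds generalizing is with
  | nil => simp [pvLin]
  | cons d ds ih =>
    cases is with
    | nil => simp at h
    | cons i is =>
      simp only [List.zip_cons_cons, pvLin, List.prod_cons]
      rw [ih is (by simpa using h)]
      ring

-- A's value as a sum over Nat indices of coordinate × suffix product.
theorem A_sum_form (idx_tuple dimensions : List Int) :
    compute_linear_idx idx_tuple dimensions =
      ((List.range dimensions.length).map
        (fun k => idx_tuple.getD k 0 * (dimensions.drop (k + 1)).prod)).sum := by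
  unfold compute_linear_idx
  rw [PySem.List.foldl_add (g := fun i => PySem.List.pyGetD idx_tuple i 0 *
      ((PySem.List.pyRange (i + 1) (PySem.List.len dimensions) 1).foldl
        (fun o j => o * PySem.List.pyGetD dimensions j 0) 1))]
  rw [PySem.List.pyRange_one]
  simp only [PySem.List.len_eq, sub_zero, Int.toNat_natCast, List.map_map, zero_add]
  congr 1
  apply List.map_congr_left
  intro k hk
  simp only [Function.comp_apply, PySem.List.pyGetD_natCast]
  have h1 : ((k : Int) + 1) = ((k + 1 : Nat) : Int) := by push_cast; ring
  have h2 := PySem.List.foldl_pyRange_pyGetD' dimensions (0 : Int) (fun o x => o * x) 1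
    (a := ((k + 1 : Nat) : Int)) (by positivity)
  simp only [Int.toNat_natCast] at h2
  rw [h1, h2, List.prod_eq_foldl]

theorem sum_form_eq_pvLin (is ds : List Int) (h : ds.length ≤ is.length) :
    ((List.range ds.length).map
        (fun k => is.getD k 0 * (ds.drop (k + 1)).prod)).sum
      = (pvLin (is.zip ds)).1 := by
  induction ds generalizing is with
  | nil => simp [pvLin]
  | cons d ds ih =>
    cases is with
    | nil => simp at h
    | cons i is =>
      have hle : ds.length ≤ is.length := by simpa using h
      rw [show (d :: ds).length = ds.length + 1 from rfl, List.range_succ_eq_map,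
        List.map_cons, List.sum_cons, List.map_map]
      have hf : ((fun k => (i :: is).getD k 0 * (List.drop (k + 1) (d :: ds)).prod) ∘ Nat.succ)
          = fun k => is.getD k 0 * (List.drop (k + 1) ds).prod := by
        funext k
        simp [Nat.succ_eq_add_one]
      rw [hf, ih is hle]
      simp only [List.zip_cons_cons, pvLin, List.getD_cons_zero, List.drop_succ_cons,
        List.drop_zero]
      rw [pvLin_snd is ds hle]
      ring

-- ===== VERDICT (by name: the statement is the Claim_ definition above) =====
theorem compute_linear_idx_spec : Claim_equal_compute_linear_idx := by
  intro idx_tuple dimensions _ hpre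
  unfold Spec_compute_linear_idx
  rw [alt_eq_pvLin, A_sum_form, sum_form_eq_pvLin _ _ hpre]
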